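-- pv_equiv track=rewrite | github.com/zst566/clawd | skills/browser-use/browser_use/skill_cli/commands/doctor.py | _summarize_checks
-- ===== SOURCE A (Python) =====
-- from typing import Any
--
-- def _summarize_checks(checks: dict[str, dict[str, Any]]) -> str:
-- 	"""Generate a summary of check results."""
-- 	ok = sum(1 for c in checks.values() if c.get('status') == 'ok')
-- 	warning = sum(1 for c in checks.values() if c.get('status') == 'warning')
-- 	error = sum(1 for c in checks.values() if c.get('status') == 'error')
-- 	missing = sum(1 for c in checks.values() if c.get('status') == 'missing')
--
-- 	total = len(checks)
--
-- 	parts = [f'{ok}/{total} checks passed']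
-- 	if warning > 0:
-- 		parts.append(f'{warning} warnings')
-- 	if error > 0:
-- 		parts.append(f'{error} errors')
-- 	if missing > 0:
-- 		parts.append(f'{missing} missing')
--
-- 	return ', '.join(parts)
-- ===== SOURCE B (Python) =====
-- from typing import Any
--
-- def _summarize_checks(checks: dict[str, dict[str, Any]]) -> str:
-- 	"""Generate a summary of check results (single tally pass instead of four scans)."""
-- 	counts: dict[Any, int] = {}
-- 	for c in checks.values():
-- 		s = c.get('status')
-- 		counts[s] = counts.get(s, 0) + 1
--
-- 	ok = counts.get('ok', 0)
-- 	warning = counts.get('warning', 0)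
-- 	error = counts.get('error', 0)
-- 	missing = counts.get('missing', 0)
--
-- 	parts = [f'{ok}/{len(checks)} checks passed']
-- 	if warning > 0:
-- 		parts.append(f'{warning} warnings')
-- 	if error > 0:
-- 		parts.append(f'{error} errors')
-- 	if missing > 0:
-- 		parts.append(f'{missing} missing')
--
-- 	return ', '.join(parts)
-- ===== Notes on version B (the rewrite author's own statement) =====
-- stated objective: simpler
-- what changed: Replaces A's four separate sum() scans over checks.values() with one tally loop building a status->count dict, then four constant lookups with default 0.
import Mathlib
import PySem

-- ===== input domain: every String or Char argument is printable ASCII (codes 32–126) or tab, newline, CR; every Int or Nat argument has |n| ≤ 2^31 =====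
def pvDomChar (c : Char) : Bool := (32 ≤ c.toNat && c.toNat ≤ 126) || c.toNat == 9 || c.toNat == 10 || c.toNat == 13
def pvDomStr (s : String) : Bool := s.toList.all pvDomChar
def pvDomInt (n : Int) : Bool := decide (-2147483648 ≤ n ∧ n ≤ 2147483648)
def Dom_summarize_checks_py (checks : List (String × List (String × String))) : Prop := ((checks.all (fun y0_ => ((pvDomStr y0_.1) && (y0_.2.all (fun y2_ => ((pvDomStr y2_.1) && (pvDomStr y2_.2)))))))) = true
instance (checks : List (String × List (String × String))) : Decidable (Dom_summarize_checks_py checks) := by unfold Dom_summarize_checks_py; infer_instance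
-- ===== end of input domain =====

-- B replaces A's four separate counting scans by a single tally pass into a dict; same output, simpler traversal.

-- ===== PORT A =====
-- A: four generator-sum scans over checks.values(), then parts built with >0 guards.
def summarize_checks_py (checks : List (String × List (String × String))) : String :=
  let vals := checks.map (·.2)
  let ok := ((vals.filter (fun c => (PySem.Dict.mk c).get? "status" == some "ok")).map (fun _ => (1 : Int))).sum
  let warning := ((vals.filter (fun c => (PySem.Dict.mk c).get? "status" == some "warning")).map (fun _ => (1 : Int))).sum
  let error := ((vals.filter (fun c => (PySem.Dict.mk c).get? "status" == some "error")).map (fun _ => (1 : Int))).sum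
  let missing := ((vals.filter (fun c => (PySem.Dict.mk c).get? "status" == some "missing")).map (fun _ => (1 : Int))).sum
  let total : Int := (checks.length : Int)
  let parts := [PySem.Int.toStr ok ++ "/" ++ PySem.Int.toStr total ++ " checks passed"]
  let parts := if warning > 0 then parts ++ [PySem.Int.toStr warning ++ " warnings"] else parts
  let parts := if error > 0 then parts ++ [PySem.Int.toStr error ++ " errors"] else parts
  let parts := if missing > 0 then parts ++ [PySem.Int.toStr missing ++ " missing"] else parts
  PySem.Str.join ", " parts

-- ===== PORT B =====
-- B: one fold over the values tallying each status into a dict, then four getD lookups.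
def summarize_checks_py_alt (checks : List (String × List (String × String))) : String :=
  let counts := checks.foldl
    (fun d p =>
      let s := (PySem.Dict.mk p.2).get? "status"
      d.insert s (d.getD s 0 + 1))
    (PySem.Dict.empty : PySem.Dict (Option String) Int)
  let ok := counts.getD (some "ok") 0
  let warning := counts.getD (some "warning") 0
  let error := counts.getD (some "error") 0
  let missing := counts.getD (some "missing") 0
  let parts := [PySem.Int.toStr ok ++ "/" ++ PySem.Int.toStr (checks.length : Int) ++ " checks passed"]
  let parts := if warning > 0 then parts ++ [PySem.Int.toStr warning ++ " warnings"] else parts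
  let parts := if error > 0 then parts ++ [PySem.Int.toStr error ++ " errors"] else parts
  let parts := if missing > 0 then parts ++ [PySem.Int.toStr missing ++ " missing"] else parts
  PySem.Str.join ", " parts

-- ===== PRECONDITION & SPEC =====
def Spec_summarize_checks_py (checks : List (String × List (String × String))) (out : String) : Prop := out = summarize_checks_py_alt checks
instance (checks : List (String × List (String × String))) (out : String) : Decidable (Spec_summarize_checks_py checks out) := by unfold Spec_summarize_checks_py; infer_instance

-- ===== CLAIM (what is proved, stated in full; the proofs are below) =====
def Claim_equal_summarize_checks_py : Prop := ∀ (checks : List (String × List (String × String))), Dom_summarize_checks_py checks → Spec_summarize_checks_py checks (summarize_checks_py checks)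

-- ===== LEMMAS AND PROOFS =====

-- A's 0/1-sum over a filtered scan equals B's tally-dict lookup, for each status key.
theorem pv_count_eq (checks : List (String × List (String × String))) (s : String) :
    (((checks.map (·.2)).filter (fun c => (PySem.Dict.mk c).get? "status" == some s)).map (fun _ => (1 : Int))).sum
    = (checks.foldl
        (fun d p =>
          let t := (PySem.Dict.mk p.2).get? "status"
          d.insert t (d.getD t 0 + 1))
        (PySem.Dict.empty : PySem.Dict (Option String) Int)).getD (some s) 0 := by
  have hB : (checks.foldl
        (fun d p =>
          let t := (PySem.Dict.mk p.2).get? "status"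
          d.insert t (d.getD t 0 + 1))
        (PySem.Dict.empty : PySem.Dict (Option String) Int))
      = PySem.Dict.counter (checks.map (fun p => (PySem.Dict.mk p.2).get? "status")) := by
    rw [← PySem.Dict.foldl_insert_getD_add_one_eq_counter, List.foldl_map]
  rw [hB, PySem.Dict.getD_counter, List.count, List.countP_map]
  rw [PySem.List.sum_map_const_int, mul_one, ← List.countP_eq_length_filter, List.countP_map]
  rfl

-- ===== VERDICT (by name: the statement is the Claim_ definition above) =====
theorem summarize_checks_py_spec : Claim_equal_summarize_checks_py := by
  intro checks _
  unfold Spec_summarize_checks_py summarize_checks_py summarize_checks_py_alt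
  simp only [pv_count_eq]
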